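-- pv_equiv track=rewrite | github.com/inveniosoftware/invenio | invenio/legacy/bibauthorid/name_utils.py | create_name_tuples
-- ===== SOURCE A (Python) =====
-- def create_name_tuples(names):
--     '''
--     Find name combinations, i.e. permutations of the names in different
--     positions of the name
--
--     @param names: a list of names
--     @type names: list of string
--
--     @return: the combinations of the names given
--     @rtype: list of lists of strings
--     '''
--     length = float(len(names))
--     max_tuples = int((length / 2) * (length - 1))
--     current_tuple = 1
--     pos = 0
--     off = 1
--     variants = [" ".join(names)]
--
--     for i in range(max_tuples):
--         variant = "%s %s %s" % (' '.join(names[0:pos]),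
--                             ''.join(names[pos:off + 1]).capitalize(),
--                             ' '.join(names[off + 1::]))
--         variants.append(variant.strip())
--         pos += 1
--         off += 1
--
--         if off >= length:
--             pos = i * 0
--             off = current_tuple + 1
--             current_tuple += 1
--
--     return variants
-- ===== SOURCE B (Python) =====
-- def create_name_tuples(names):
--     n = len(names)
--     # staged pass 1: prefix tables -- P[i] = ' '.join(names[:i]), C[i] = ''.join(names[:i])
--     P = ['']
--     C = ['']
--     for w in names:
--         P.append(w if len(P) == 1 else P[-1] + ' ' + w)
--         C.append(C[-1] + w)
--     # staged pass 2: suffix table -- S[i] = ' '.join(names[i:])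
--     S = ['']
--     for w in reversed(names):
--         S.append(w if len(S) == 1 else w + ' ' + S[-1])
--     S.reverse()
--     # staged pass 3: all glue spans (width d, start s), put in width-major order by
--     # sorting on the rank d*n + s (s < n, so this is the lexicographic rank of (d, s))
--     spans = sorted(((j - i, i) for i in range(n) for j in range(i + 1, n)),
--                    key=lambda p: p[0] * n + p[1])
--     variants = [P[n]]
--     for d, s in spans:
--         glued = C[s + d + 1][len(C[s]):].capitalize()
--         variants.append((P[s] + ' ' + glued + ' ' + S[s + d + 1]).strip())
--     return variants
-- ===== Notes on version B (the rewrite author's own statement) =====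
-- stated objective: alternative
-- what changed: Instead of A's single counted loop that re-joins list slices for every variant with pos/off/current_tuple/max_tuples bookkeeping, B runs staged passes: it first builds prefix-join, prefix-concatenation and suffix-join tables, then enumerates the glue spans by sorting all index pairs into width-major order and assembles each variant from the three precomputed table entries.
import Mathlib
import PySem

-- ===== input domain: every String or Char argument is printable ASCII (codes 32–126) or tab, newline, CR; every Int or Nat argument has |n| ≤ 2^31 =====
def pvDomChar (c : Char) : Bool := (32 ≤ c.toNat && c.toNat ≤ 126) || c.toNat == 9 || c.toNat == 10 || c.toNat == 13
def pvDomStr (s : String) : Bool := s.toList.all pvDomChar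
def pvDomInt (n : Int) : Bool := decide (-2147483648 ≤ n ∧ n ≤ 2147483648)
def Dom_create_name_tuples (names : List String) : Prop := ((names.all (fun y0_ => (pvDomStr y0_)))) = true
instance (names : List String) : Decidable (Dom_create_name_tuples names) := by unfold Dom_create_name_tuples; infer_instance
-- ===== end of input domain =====

-- B replaces A's hand-flattened span loop (pos/off/current_tuple/max_tuples bookkeeping) by
-- staged passes: three prefix/suffix table builds, then one pass over the glue spans obtained
-- by sorting all index pairs into width-major order (objective: alternative).

-- shared helper: Python str.capitalize() — first char uppercased, the rest lowercased
-- (hand-ported, PySem has no capitalize; exact on the ASCII domain)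
def pvCap (cs : List Char) : List Char :=
  match cs with
  | [] => []
  | c :: t => PySem.Chars.upperChar c :: t.map PySem.Chars.lowerChar

-- ===== PORT A =====
-- one iteration of A's `for i in range(max_tuples)` body over state (current_tuple, pos, off, variants)
def pvStepA (ns : List (List Char)) (st : Nat × Nat × Nat × List String) (i : Nat) :
    Nat × Nat × Nat × List String :=
  let (cur, pos, off, vs) := st
  let variant := PySem.Chars.strip
    (PySem.Chars.join [' '] (ns.take pos) ++ [' ']
      ++ pvCap (PySem.Chars.join [] ((ns.drop pos).take (off + 1 - pos))) ++ [' ']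
      ++ PySem.Chars.join [' '] (ns.drop (off + 1)))
  let vs := vs ++ [String.mk variant]
  let pos := pos + 1
  let off := off + 1
  if off ≥ ns.length then (cur + 1, i * 0, cur + 1, vs) else (cur, pos, off, vs)

def create_name_tuples (names : List String) : List String :=
  let ns := names.map String.toList
  let length := ns.length
  -- int((length / 2) * (length - 1)) in exact float arithmetic = n*(n-1)/2
  let max_tuples := length * (length - 1) / 2
  let variants := [String.mk (PySem.Chars.join [' '] ns)]
  ((List.range max_tuples).foldl (pvStepA ns) (1, 0, 1, variants)).2.2.2

-- ===== PORT B =====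
-- pass-1 step: P.append(w if len(P) == 1 else P[-1] + ' ' + w)
def pvStepP (P : List (List Char)) (w : List Char) : List (List Char) :=
  P ++ [if P.length = 1 then w else P.getLastD [] ++ ' ' :: w]
-- pass-1 step: C.append(C[-1] + w)
def pvStepC (C : List (List Char)) (w : List Char) : List (List Char) :=
  C ++ [C.getLastD [] ++ w]
-- pass-2 step: S.append(w if len(S) == 1 else w + ' ' + S[-1])
def pvStepS (S : List (List Char)) (w : List Char) : List (List Char) :=
  S ++ [if S.length = 1 then w else w ++ ' ' :: S.getLastD []]

-- core of B on the names as char lists; table indexing C[i]/P[i]/S[i] is always in range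
-- (the tables have n+1 entries), so .getD is exact; x[k:] with k = a length is List.drop
def pvAltCore (ns : List (List Char)) : List String :=
  let n := ns.length
  let P := ns.foldl pvStepP [[]]
  let C := ns.foldl pvStepC [[]]
  let S := (ns.reverse.foldl pvStepS [[]]).reverse
  -- sorted((j - i, i) for i in range(n) for j in range(i + 1, n)), key = d*n + s
  let spans := PySem.List.sorted
    ((List.range n).flatMap (fun i => (List.range' (i + 1) (n - (i + 1))).map (fun j => (j - i, i))))
    (fun p => p.1 * n + p.2) false
  spans.foldl
    (fun vs p =>
      vs ++ [String.mk (PySem.Chars.strip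
        (P.getD p.2 [] ++ [' ']
          ++ pvCap ((C.getD (p.2 + p.1 + 1) []).drop (C.getD p.2 []).length) ++ [' ']
          ++ S.getD (p.2 + p.1 + 1) []))])
    [String.mk (P.getD n [])]

def create_name_tuples_alt (names : List String) : List String :=
  pvAltCore (names.map String.toList)

-- ===== PRECONDITION & SPEC =====
def Spec_create_name_tuples (names : List String) (out : List String) : Prop := out = create_name_tuples_alt names
instance (names : List String) (out : List String) : Decidable (Spec_create_name_tuples names out) := by unfold Spec_create_name_tuples; infer_instance

-- ===== CLAIM (what is proved, stated in full; the proofs are below) =====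
def Claim_equal_create_name_tuples : Prop := ∀ (names : List String), Dom_create_name_tuples names → Spec_create_name_tuples names (create_name_tuples names)

-- ===== LEMMAS AND PROOFS =====

-- the variant string produced for the span of width d starting at s (proof-side notion)
def pvVariantB (ns : List (List Char)) (d s : Nat) : String :=
  String.mk (PySem.Chars.strip
    (PySem.Chars.join [' '] (ns.take s) ++ [' ']
      ++ pvCap (PySem.Chars.join [] ((ns.drop s).take (s + d + 1 - s))) ++ [' ']
      ++ PySem.Chars.join [' '] (ns.drop (s + d + 1))))

-- ---- A-side characterisation ----

-- A's step ignores i (pos := i * 0 = 0)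
def pvStepA1 (ns : List (List Char)) (st : Nat × Nat × Nat × List String) :
    Nat × Nat × Nat × List String := pvStepA ns st 0

theorem pvStepA_eq (ns : List (List Char)) (st : Nat × Nat × Nat × List String) (i : Nat) :
    pvStepA ns st i = pvStepA1 ns st := by
  obtain ⟨c, p, o, vs⟩ := st
  simp [pvStepA, pvStepA1]

def pvIterA (ns : List (List Char)) : Nat → (Nat × Nat × Nat × List String) → Nat × Nat × Nat × List String
  | 0, st => st
  | k + 1, st => pvIterA ns k (pvStepA1 ns st)

theorem pvFoldl_iterA (ns : List (List Char)) (l : List Nat) (st : Nat × Nat × Nat × List String) :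
    l.foldl (pvStepA ns) st = pvIterA ns l.length st := by
  induction l generalizing st with
  | nil => rfl
  | cons x t ih => simp [List.foldl, pvStepA_eq, pvIterA, ih]

-- the sequence of variants A's loop appends from state (d, s, s+d, ·) onwards
def pvRest (ns : List (List Char)) (d s : Nat) : List String :=
  if h : s + d < ns.length then
    pvVariantB ns d s ::
      (if ns.length ≤ s + d + 1 then pvRest ns (d + 1) 0 else pvRest ns d (s + 1))
  else []
termination_by (ns.length - d, ns.length - s)
decreasing_by
  · have : d < ns.length := by omega
    exact Prod.Lex.left _ _ (by omega)
  · exact Prod.Lex.right _ (by omega)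

theorem pvSim (ns : List (List Char)) :
    ∀ d s, ∀ vs, s + d < ns.length →
      (pvIterA ns (pvRest ns d s).length (d, s, s + d, vs)).2.2.2 = vs ++ pvRest ns d s := by
  intro d s
  induction d, s using pvRest.induct ns with
  | case1 d s h ihrow ihcol =>
    intro vs _
    rw [pvRest, dif_pos h]
    by_cases hb : ns.length ≤ s + d + 1
    · rw [if_pos hb]
      show (pvIterA ns ((pvRest ns (d+1) 0).length + 1) _).2.2.2 = _
      have hstep : pvStepA1 ns (d, s, s + d, vs) = (d + 1, 0, 0 + (d + 1), vs ++ [pvVariantB ns d s]) := by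
        simp only [pvStepA1, pvStepA, pvVariantB]
        rw [if_pos (by omega : s + d + 1 ≥ ns.length)]
        simp only [Prod.mk.injEq]
        and_intros <;> first | rfl | trivial | omega
      rw [pvIterA, hstep]
      by_cases h3 : 0 + (d + 1) < ns.length
      · rw [ihrow hb (vs ++ [pvVariantB ns d s]) h3]; simp
      · rw [pvRest, dif_neg h3]; simp [pvIterA]
    · rw [if_neg hb]
      show (pvIterA ns ((pvRest ns d (s+1)).length + 1) _).2.2.2 = _
      have hstep : pvStepA1 ns (d, s, s + d, vs) = (d, s + 1, (s + 1) + d, vs ++ [pvVariantB ns d s]) := by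
        simp only [pvStepA1, pvStepA, pvVariantB]
        rw [if_neg (by omega : ¬ s + d + 1 ≥ ns.length)]
        simp only [Prod.mk.injEq]
        and_intros <;> first | rfl | trivial | omega
      rw [pvIterA, hstep, ihcol hb (vs ++ [pvVariantB ns d s]) (by omega)]
      simp
  | case2 d s h =>
    intro vs hv
    exact absurd hv h

theorem pvTri (k : Nat) : k + (k - 1) * k / 2 = k * (k + 1) / 2 := by
  cases k with
  | zero => rfl
  | succ m =>
    have h : (m + 1) * (m + 1 + 1) = m * (m + 1) + (m + 1) * 2 := by ring
    simp only [Nat.add_sub_cancel]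
    rw [h, Nat.add_mul_div_right _ _ (by norm_num : (0:ℕ) < 2)]
    omega

theorem pvRestLen (ns : List (List Char)) :
    ∀ d s, (pvRest ns d s).length =
      if s + d < ns.length then (ns.length - d - s) + (ns.length - d - 1) * (ns.length - d) / 2 else 0 := by
  intro d s
  induction d, s using pvRest.induct ns with
  | case1 d s h ihrow ihcol =>
    rw [pvRest, dif_pos h, if_pos h]
    by_cases hb : ns.length ≤ s + d + 1
    · rw [if_pos hb]
      simp only [List.length_cons, ihrow hb]
      by_cases h3 : 0 + (d + 1) < ns.length
      · rw [if_pos h3]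
        have := pvTri (ns.length - (d + 1))
        have he : ns.length - (d + 1) + 1 = ns.length - d := by omega
        rw [he] at this
        generalize hq : (ns.length - d - 1) * (ns.length - d) / 2 = q at *
        generalize hr : (ns.length - (d+1) - 1) * (ns.length - (d+1)) / 2 = r at *
        omega
      · rw [if_neg h3]
        have h4 : ns.length - d - 1 = 0 := by omega
        rw [h4]
        omega
    · rw [if_neg hb]
      simp only [List.length_cons, ihcol hb]
      rw [if_pos (by omega : (s + 1) + d < ns.length)]
      generalize (ns.length - d - 1) * (ns.length - d) / 2 = q
      omega
  | case2 d s h =>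
    rw [pvRest, dif_neg h, if_neg h]
    rfl

theorem pvRow (ns : List (List Char)) :
    ∀ d s, s + d < ns.length →
      pvRest ns d s = (List.range (ns.length - d - s)).map (fun j => pvVariantB ns d (s + j))
        ++ pvRest ns (d + 1) 0 := by
  intro d s
  induction d, s using pvRest.induct ns with
  | case1 d s h ihrow ihcol =>
    intro _
    rw [pvRest, dif_pos h]
    by_cases hb : ns.length ≤ s + d + 1
    · rw [if_pos hb]
      have h4 : ns.length - d - s = 1 := by omega
      rw [h4]
      simp
    · rw [if_neg hb, ihcol hb (by omega)]
      have h4 : ns.length - d - s = (ns.length - d - (s + 1)) + 1 := by omega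
      rw [h4, List.range_succ_eq_map]
      simp only [List.map_cons, List.map_map, Function.comp_def, Nat.add_zero, List.cons_append]
      congr 2
      refine List.map_congr_left fun j _ => ?_
      congr 1
      omega
  | case2 d s h =>
    intro hv
    exact absurd hv h

theorem pvFlat (ns : List (List Char)) :
    ∀ k d, k = ns.length - d →
      pvRest ns d 0 = (List.range' d k).flatMap
        (fun e => (List.range (ns.length - e)).map (fun s => pvVariantB ns e s)) := by
  intro k
  induction k with
  | zero =>
    intro d hd
    rw [pvRest, dif_neg (by omega)]
    simp
  | succ m ih =>
    intro d hd
    have hdn : d < ns.length := by omega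
    rw [pvRow ns d 0 (by omega), List.range'_succ, List.flatMap_cons, ih (d + 1) (by omega)]
    simp

-- ---- B-side characterisation ----

-- ' '.join over a snoc
theorem pvJoinSnoc (sep : List Char) (l : List (List Char)) (w : List Char) :
    PySem.Chars.join sep (l ++ [w])
      = if l = [] then w else PySem.Chars.join sep l ++ sep ++ w := by
  induction l with
  | nil => simp [PySem.Chars.join_singleton]
  | cons a t ih =>
    cases t with
    | nil => simp [PySem.Chars.join_cons_cons, PySem.Chars.join_singleton]
    | cons b t2 =>
      have : (a :: b :: t2) ++ [w] = a :: ((b :: t2) ++ [w]) := rfl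
      rw [this, show (b :: t2) ++ [w] = b :: (t2 ++ [w]) from rfl,
        PySem.Chars.join_cons_cons, show b :: (t2 ++ [w]) = (b :: t2) ++ [w] from rfl, ih]
      simp [PySem.Chars.join_cons_cons]

-- ''.join is an append homomorphism
theorem pvJoinNilCons (x : List Char) (l : List (List Char)) :
    PySem.Chars.join [] (x :: l) = x ++ PySem.Chars.join [] l := by
  cases l with
  | nil => simp [PySem.Chars.join_singleton, PySem.Chars.join_nil]
  | cons y t => rw [PySem.Chars.join_cons_cons]; simp

theorem pvJoinNilAppend (a b : List (List Char)) :
    PySem.Chars.join [] (a ++ b) = PySem.Chars.join [] a ++ PySem.Chars.join [] b := by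
  induction a with
  | nil => simp [PySem.Chars.join_nil]
  | cons x t ih => simp [pvJoinNilCons, ih]

theorem pvGetLastMap (f : Nat → List Char) (m : Nat) :
    ((List.range (m + 1)).map f).getLastD [] = f m := by
  rw [List.range_succ, List.map_append]
  simp

-- pass 1, P: the prefix-join table
theorem pvPtab (ns : List (List Char)) :
    ns.foldl pvStepP [[]]
      = (List.range (ns.length + 1)).map (fun i => PySem.Chars.join [' '] (ns.take i)) := by
  induction ns using List.reverseRecOn with
  | nil => rfl
  | append_singleton l w ih =>
    rw [List.foldl_append, List.foldl_cons, List.foldl_nil, ih]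
    unfold pvStepP
    rw [List.length_append, List.length_singleton, List.range_succ (n := l.length + 1),
      List.map_append]
    congr 1
    · refine List.map_congr_left fun i hi => ?_
      rw [List.take_append_of_le_length (by simp at hi; omega)]
    · simp only [List.map_cons, List.map_nil]
      by_cases hl : l = []
      · subst hl
        simp [PySem.Chars.join_singleton]
      · have hlen : l.length ≠ 0 := fun h => hl (List.length_eq_zero_iff.mp h)
        rw [if_neg (by simp; omega)]
        cases l with
        | nil => exact absurd rfl hl
        | cons a t =>
          rw [pvGetLastMap, List.take_length,
            List.take_of_length_le (by simp), pvJoinSnoc _ _ _ ]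
          rw [if_neg hl]
          simp

-- pass 1, C: the prefix-concatenation table
theorem pvCtab (ns : List (List Char)) :
    ns.foldl pvStepC [[]]
      = (List.range (ns.length + 1)).map (fun i => PySem.Chars.join [] (ns.take i)) := by
  induction ns using List.reverseRecOn with
  | nil => rfl
  | append_singleton l w ih =>
    rw [List.foldl_append, List.foldl_cons, List.foldl_nil, ih]
    unfold pvStepC
    rw [List.length_append, List.length_singleton, List.range_succ (n := l.length + 1),
      List.map_append]
    congr 1
    · refine List.map_congr_left fun i hi => ?_
      rw [List.take_append_of_le_length (by simp at hi; omega)]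
    · simp only [List.map_cons, List.map_nil]
      rw [pvGetLastMap, List.take_length, List.take_of_length_le (by simp),
        pvJoinNilAppend]
      simp [PySem.Chars.join_singleton]

-- pass 2, S before the final reversal (stated for the folded list itself)
theorem pvStab (l : List (List Char)) :
    l.foldl pvStepS [[]]
      = (List.range (l.length + 1)).map (fun i => PySem.Chars.join [' '] ((l.take i).reverse)) := by
  induction l using List.reverseRecOn with
  | nil => rfl
  | append_singleton l w ih =>
    rw [List.foldl_append, List.foldl_cons, List.foldl_nil, ih]
    unfold pvStepS
    rw [List.length_append, List.length_singleton, List.range_succ (n := l.length + 1),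
      List.map_append]
    congr 1
    · refine List.map_congr_left fun i hi => ?_
      rw [List.take_append_of_le_length (by simp at hi; omega)]
    · simp only [List.map_cons, List.map_nil]
      by_cases hl : l = []
      · subst hl
        simp [PySem.Chars.join_singleton]
      · have hlen : l.length ≠ 0 := fun h => hl (List.length_eq_zero_iff.mp h)
        rw [if_neg (by simp; omega)]
        rw [pvGetLastMap, List.take_length, List.take_of_length_le (by simp),
          List.reverse_append]
        simp only [List.reverse_singleton, List.singleton_append]
        obtain ⟨r, rest, hr⟩ : ∃ r rest, l.reverse = r :: rest := by
          cases hrev : l.reverse with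
          | nil => exact absurd (by simpa using congrArg List.reverse hrev) hl
          | cons r rest => exact ⟨r, rest, rfl⟩
        rw [hr, PySem.Chars.join_cons_cons]
        simp

-- getD into the reversed table
theorem pvGetDRev (f : Nat → List Char) (m k : Nat) (hk : k < m) :
    (((List.range m).map f).reverse).getD k [] = f (m - 1 - k) := by
  have h1 : k < (((List.range m).map f).reverse).length := by simpa using hk
  rw [List.getD_eq_getElem _ _ h1, List.getElem_reverse]
  simp

-- the span list in width-major order
def pvCanon (n : Nat) : List (Nat × Nat) :=
  (List.range' 1 (n - 1)).flatMap (fun d => (List.range (n - d)).map (fun s => (d, s)))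

theorem pvMemCanon (n : Nat) (p : Nat × Nat) :
    p ∈ pvCanon n ↔ 1 ≤ p.1 ∧ p.2 + p.1 < n := by
  obtain ⟨d, s⟩ := p
  simp only [pvCanon, List.mem_flatMap, List.mem_range', List.mem_range, List.mem_map,
    Prod.mk.injEq]
  constructor
  · rintro ⟨e, ⟨i, hi, rfl⟩, t, ht, rfl, rfl⟩
    omega
  · rintro ⟨h1, h2⟩
    exact ⟨d, ⟨d - 1, by omega, by omega⟩, s, by omega, rfl, rfl⟩

theorem pvMemGen (n : Nat) (p : Nat × Nat) :
    p ∈ (List.range n).flatMap (fun i => (List.range' (i + 1) (n - (i + 1))).map (fun j => (j - i, i)))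
      ↔ 1 ≤ p.1 ∧ p.2 + p.1 < n := by
  obtain ⟨d, s⟩ := p
  simp only [List.mem_flatMap, List.mem_range, List.mem_range', List.mem_map, Prod.mk.injEq]
  constructor
  · rintro ⟨i, hi, j, ⟨t, ht, rfl⟩, rfl, rfl⟩
    omega
  · rintro ⟨h1, h2⟩
    exact ⟨s, by omega, s + d, ⟨d - 1, by omega, by omega⟩, by omega, rfl⟩

theorem pvCanonPairwise (n : Nat) :
    (pvCanon n).Pairwise (fun a b => a.1 * n + a.2 < b.1 * n + b.2) := by
  unfold pvCanon
  rw [List.pairwise_flatMap]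
  refine ⟨fun d _ => ?_, ?_⟩
  · rw [List.pairwise_map]
    exact List.pairwise_lt_range.imp (fun {a b} h => show d * n + a < d * n + b by omega)
  · have hpw : (List.range' 1 (n - 1)).Pairwise (· < ·) := List.pairwise_lt_range'
    refine hpw.imp_of_mem fun {d1 d2} h1 h2 hlt => ?_
    intro x hx y hy
    obtain ⟨s1, hs1, rfl⟩ := List.mem_map.mp hx
    obtain ⟨s2, hs2, rfl⟩ := List.mem_map.mp hy
    simp only [List.mem_range] at hs1 hs2
    have hd1 : d1 * n + s1 < (d1 + 1) * n := by
      have hs1n : s1 < n := by omega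
      have he : (d1 + 1) * n = d1 * n + n := by ring
      omega
    have hd2 : (d1 + 1) * n ≤ d2 * n := Nat.mul_le_mul_right n (by omega)
    simp only
    omega

theorem pvGenPairwise (n : Nat) :
    ((List.range n).flatMap
        (fun i => (List.range' (i + 1) (n - (i + 1))).map (fun j => (j - i, i)))).Pairwise
      (fun a b => a.2 * n + a.1 < b.2 * n + b.1) := by
  rw [List.pairwise_flatMap]
  refine ⟨fun i _ => ?_, ?_⟩
  · rw [List.pairwise_map]
    refine (List.pairwise_lt_range' (s := i + 1) (n := n - (i + 1))).imp_of_mem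
      fun {j1 j2} h1 h2 hlt => ?_
    have hj1 : i + 1 ≤ j1 := by
      obtain ⟨t, ht, rfl⟩ := List.mem_range'.mp h1
      omega
    simp only
    omega
  · have hpw : (List.range n).Pairwise (· < ·) := List.pairwise_lt_range
    refine hpw.imp_of_mem fun {i1 i2} h1 h2 hlt => ?_
    intro x hx y hy
    obtain ⟨j1, hj1, rfl⟩ := List.mem_map.mp hx
    obtain ⟨j2, hj2, rfl⟩ := List.mem_map.mp hy
    obtain ⟨t1, ht1, rfl⟩ := List.mem_range'.mp hj1
    obtain ⟨t2, ht2, rfl⟩ := List.mem_range'.mp hj2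
    have ha : i1 * n + ((i1 + 1 + 1 * t1) - i1) < (i1 + 1) * n := by
      have hk : (i1 + 1 + 1 * t1) - i1 < n := by omega
      have he : (i1 + 1) * n = i1 * n + n := by ring
      omega
    have hb : (i1 + 1) * n ≤ i2 * n := Nat.mul_le_mul_right n (by omega)
    simp only
    omega

theorem pvSpansEq (n : Nat) :
    PySem.List.sorted
        ((List.range n).flatMap
          (fun i => (List.range' (i + 1) (n - (i + 1))).map (fun j => (j - i, i))))
        (fun p => p.1 * n + p.2) false
      = pvCanon n := by
  refine PySem.List.sorted_eq_of_perm_of_pairwise_lt _ _ _ ?_ (pvCanonPairwise n)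
  have ndC : (pvCanon n).Nodup :=
    (pvCanonPairwise n).imp fun {a b} h => by rintro rfl; exact absurd h (lt_irrefl _)
  have ndG : ((List.range n).flatMap
      (fun i => (List.range' (i + 1) (n - (i + 1))).map (fun j => (j - i, i)))).Nodup :=
    (pvGenPairwise n).imp fun {a b} h => by rintro rfl; exact absurd h (lt_irrefl _)
  rw [List.perm_ext_iff_of_nodup ndC ndG]
  intro p
  rw [pvMemCanon, pvMemGen]

theorem pvCoreEq (ns : List (List Char)) :
    pvAltCore ns =
      [String.mk (PySem.Chars.join [' '] ns)]
        ++ (List.range' 1 (ns.length - 1)).flatMap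
            (fun d => (List.range (ns.length - d)).map (fun s => pvVariantB ns d s)) := by
  unfold pvAltCore
  simp only [pvPtab, pvCtab, pvStab, pvSpansEq, List.length_reverse,
    PySem.List.foldl_append_singleton_eq_map]
  rw [PySem.List.getD_map_range _ _ _ _ (Nat.lt_succ_self _), List.take_length]
  congr 1
  unfold pvCanon
  rw [List.map_flatMap]
  refine List.flatMap_congr fun d hd => ?_
  rw [List.map_map]
  refine List.map_congr_left fun s hs => ?_
  obtain ⟨t, ht, rfl⟩ := List.mem_range'.mp hd
  simp only [List.mem_range] at hs
  have hd1 : 1 ≤ 1 + 1 * t := by omega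
  have hsd : s + (1 + 1 * t) + 1 ≤ ns.length := by omega
  generalize hdd : 1 + 1 * t = d at *
  simp only [Function.comp_apply]
  rw [PySem.List.getD_map_range _ _ _ _ (by omega : s < ns.length + 1),
    PySem.List.getD_map_range _ _ _ _ (by omega : s + d + 1 < ns.length + 1),
    PySem.List.getD_map_range _ _ _ _ (by omega : s < ns.length + 1),
    pvGetDRev _ _ _ (by omega : s + d + 1 < ns.length + 1)]
  have hidx : ns.length + 1 - 1 - (s + d + 1) = ns.length - (s + d + 1) := by omega
  rw [hidx, List.take_reverse, List.reverse_reverse,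
    show ns.length - (ns.length - (s + d + 1)) = s + d + 1 by omega]
  have hsplit : s + d + 1 = s + (d + 1) := by omega
  rw [hsplit, List.take_add, pvJoinNilAppend, List.drop_left]
  unfold pvVariantB
  rw [show s + d + 1 - s = d + 1 by omega, show s + (d + 1) = s + d + 1 by omega]

theorem pvAltEq (names : List String) :
    create_name_tuples_alt names =
      [String.mk (PySem.Chars.join [' '] (names.map String.toList))]
        ++ (List.range' 1 ((names.map String.toList).length - 1)).flatMap
            (fun d => (List.range ((names.map String.toList).length - d)).map
              (fun s => pvVariantB (names.map String.toList) d s)) := by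
  rw [create_name_tuples_alt, pvCoreEq]

-- ===== VERDICT (by name: the statement is the Claim_ definition above) =====
theorem create_name_tuples_spec : Claim_equal_create_name_tuples := by
  intro names _
  unfold Spec_create_name_tuples
  rw [pvAltEq]
  unfold create_name_tuples
  simp only [pvFoldl_iterA, List.length_range]
  by_cases h2 : 2 ≤ (names.map String.toList).length
  · have hT : (names.map String.toList).length * ((names.map String.toList).length - 1) / 2
        = (pvRest (names.map String.toList) 1 0).length := by
      rw [pvRestLen, if_pos (by omega : 0 + 1 < (names.map String.toList).length)]
      simp only [Nat.sub_zero]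
      have := pvTri ((names.map String.toList).length - 1)
      have he : (names.map String.toList).length - 1 + 1 = (names.map String.toList).length := by omega
      rw [he] at this
      rw [Nat.mul_comm]
      exact this.symm
    rw [hT, pvSim (names.map String.toList) 1 0 _ (by omega),
      pvFlat (names.map String.toList) ((names.map String.toList).length - 1) 1 rfl]
  · have hm : (names.map String.toList).length * ((names.map String.toList).length - 1) / 2 = 0 := by
      interval_cases h : (names.map String.toList).length <;> simp
    have hr : (names.map String.toList).length - 1 = 0 := by omega
    rw [hm, hr]
    simp [pvIterA]
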